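-- pv_equiv track=rewrite | github.com/mwisslead/tree_walk_with_alternates | tree_walk_with_alternates/treewalk.py | _valid_descents
-- ===== SOURCE A (Python) =====
-- def _valid_descents(items):
--     if len(items) < 1:
--         return []
--     if len(items) == 1:
--         return [items]
--     retval = []
--     for i in range(1,len(items)):
--         for x in _valid_descents(items[i:]):
--             retval.append([items[0]] + x)
--     return retval
-- ===== SOURCE B (Python) =====
-- def _valid_descents(items):
--     if len(items) < 1:
--         return []
--     if len(items) == 1:
--         return [items]
--     first, last = items[0], items[-1]
--     acc = [[]]
--     for e in reversed(items[1:-1]):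
--         acc = [[e] + s for s in acc] + acc
--     return [[first] + s + [last] for s in acc]
-- ===== Notes on version B (the rewrite author's own statement) =====
-- stated objective: alternative
-- what changed: A's branching recursion that re-enumerates valid descents of every suffix is replaced by a single iterative fold over the middle elements that builds the accumulator of subsequences once, then maps first/last onto each result in the same order.
import Mathlib
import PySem

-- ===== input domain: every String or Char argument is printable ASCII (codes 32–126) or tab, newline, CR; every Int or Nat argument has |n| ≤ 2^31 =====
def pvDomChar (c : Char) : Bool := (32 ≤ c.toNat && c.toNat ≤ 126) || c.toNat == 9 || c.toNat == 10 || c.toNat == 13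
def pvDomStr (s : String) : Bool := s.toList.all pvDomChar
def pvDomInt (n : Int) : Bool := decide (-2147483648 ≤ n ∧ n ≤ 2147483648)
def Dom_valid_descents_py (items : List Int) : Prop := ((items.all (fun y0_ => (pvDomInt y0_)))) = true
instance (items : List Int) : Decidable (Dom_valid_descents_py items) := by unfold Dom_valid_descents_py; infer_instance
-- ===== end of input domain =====

-- B replaces A's branching recursion over suffixes by one iterative fold over the middle
-- elements, building the subsequence accumulator once and mapping first/last onto it (alternative).

-- ===== PORT A =====
-- A's loop 'for i in range(1, len(items))' recursing on the slice items[i:] is ported as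
-- iteration over the successive nonempty tails of items (items[i:] for i = 1 .. len-1),
-- which are exactly those slices, appending to retval in the same order.
mutual
def valid_descents_py (items : List Int) : List (List Int) :=
  match items with
  | [] => []
  | [a] => [[a]]
  | a :: b :: rest => vdLoopA a (b :: rest)
termination_by (items.length, 1)

def vdLoopA (a : Int) (t : List Int) : List (List Int) :=
  match t with
  | [] => []
  | c :: ts => (valid_descents_py (c :: ts)).map (fun x => a :: x) ++ vdLoopA a ts
termination_by (t.length + 1, 0)
decreasing_by
  · simp [Prod.lex_def]
  · simp [Prod.lex_def]
end

-- ===== PORT B =====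
def valid_descents_py_alt (items : List Int) : List (List Int) :=
  match items with
  | [] => []
  | [a] => [[a]]
  | a :: b :: rest =>
    let tail := b :: rest
    let lastv := tail.getLast (by simp)
    -- the Python loop 'for e in reversed(items[1:-1]): acc = [[e]+s for s in acc] + acc'
    -- is this foldr over the middle elements
    let acc := tail.dropLast.foldr (fun e acc => acc.map (fun s => e :: s) ++ acc) [[]]
    acc.map (fun s => a :: (s ++ [lastv]))

-- ===== PRECONDITION & SPEC =====
def Spec_valid_descents_py (items : List Int) (out : List (List Int)) : Prop := out = valid_descents_py_alt items
instance (items : List Int) (out : List (List Int)) : Decidable (Spec_valid_descents_py items out) := by unfold Spec_valid_descents_py; infer_instance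

-- ===== CLAIM (what is proved, stated in full; the proofs are below) =====
def Claim_equal_valid_descents_py : Prop := ∀ (items : List Int), Dom_valid_descents_py items → Spec_valid_descents_py items (valid_descents_py items)

-- ===== LEMMAS AND PROOFS =====

-- B's fold over the middle elements
def vdSubs (m : List Int) : List (List Int) :=
  m.foldr (fun e acc => acc.map (fun s => e :: s) ++ acc) [[]]

-- A's inner loop over the tails m ++ [l] computes exactly B's mapped fold.
theorem vdLoopA_eq (l : Int) (m : List Int) :
    ∀ a : Int, vdLoopA a (m ++ [l]) = (vdSubs m).map (fun s => a :: (s ++ [l])) := by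
  induction m with
  | nil =>
    intro a
    simp [vdLoopA, valid_descents_py, vdSubs]
  | cons e m' ih =>
    intro a
    have hvd : valid_descents_py (e :: (m' ++ [l])) = (vdSubs m').map (fun s => e :: (s ++ [l])) := by
      cases m' with
      | nil => simpa [valid_descents_py] using ih e
      | cons c cs => simpa [valid_descents_py] using ih e
    calc vdLoopA a ((e :: m') ++ [l])
        = (valid_descents_py (e :: (m' ++ [l]))).map (fun x => a :: x) ++ vdLoopA a (m' ++ [l]) := by
          simp [vdLoopA]
      _ = (vdSubs m').map (fun s => a :: e :: (s ++ [l])) ++ (vdSubs m').map (fun s => a :: (s ++ [l])) := by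
          rw [hvd, ih a]; simp [List.map_map, Function.comp]
      _ = (vdSubs (e :: m')).map (fun s => a :: (s ++ [l])) := by
          simp [vdSubs, List.map_map, Function.comp]

-- ===== VERDICT (by name: the statement is the Claim_ definition above) =====
theorem valid_descents_py_spec : Claim_equal_valid_descents_py := by
  intro items _
  unfold Spec_valid_descents_py
  match items with
  | [] => simp [valid_descents_py, valid_descents_py_alt]
  | [a] => simp [valid_descents_py, valid_descents_py_alt]
  | a :: b :: rest =>
    have hsplit : (b :: rest).dropLast ++ [(b :: rest).getLast (by simp)] = b :: rest :=
      List.dropLast_append_getLast (by simp)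
    have := vdLoopA_eq ((b :: rest).getLast (by simp)) ((b :: rest).dropLast) a
    rw [hsplit] at this
    simpa [valid_descents_py, valid_descents_py_alt, vdSubs] using this
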